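-- pv_equiv track=rewrite | github.com/andryraveloarison/rentSearchApi | src/utils/basicFunction.py | generate_rep
-- ===== SOURCE A (Python) =====
-- def generate_rep(datas):
--     # Liste de mots-clés potentiels
--     keywords = ["le materiel", "le lieu", "les budgets", "les dates"]
--
--     # Construction de la chaîne rep en fonction des listes materials, place, et budget_amount
--     rep = ""
--     i=0
--     for data in datas:
--         if not data:
--             if not rep:
--                 rep="Veuillez préciser "+keywords[i]
--             else:
--                 rep += ", "+keywords[i]
--         i+=1
--
--     if ',' in rep:
--         repBefore, repAfter = rep.rsplit(',', 1)
--         # Concatène les deux reps avec "et" entre elles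
--         rep = repBefore + ' et' + repAfter
--
--     return rep
-- ===== SOURCE B (Python) =====
-- def generate_rep(datas):
--     keywords = ["le materiel", "le lieu", "les budgets", "les dates"]
--     missing = [keywords[i] for i, data in enumerate(datas) if not data]
--     if not missing:
--         return ""
--     if len(missing) == 1:
--         return "Veuillez préciser " + missing[0]
--     return "Veuillez préciser " + ", ".join(missing[:-1]) + " et " + missing[-1]
-- ===== Notes on version B (the rewrite author's own statement) =====
-- stated objective: simpler
-- what changed: Collects the missing keywords into a list first and then formats it by slicing/join, instead of growing a running string and surgically re-splitting it at the last comma with rsplit to insert ' et'.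
import Mathlib
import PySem

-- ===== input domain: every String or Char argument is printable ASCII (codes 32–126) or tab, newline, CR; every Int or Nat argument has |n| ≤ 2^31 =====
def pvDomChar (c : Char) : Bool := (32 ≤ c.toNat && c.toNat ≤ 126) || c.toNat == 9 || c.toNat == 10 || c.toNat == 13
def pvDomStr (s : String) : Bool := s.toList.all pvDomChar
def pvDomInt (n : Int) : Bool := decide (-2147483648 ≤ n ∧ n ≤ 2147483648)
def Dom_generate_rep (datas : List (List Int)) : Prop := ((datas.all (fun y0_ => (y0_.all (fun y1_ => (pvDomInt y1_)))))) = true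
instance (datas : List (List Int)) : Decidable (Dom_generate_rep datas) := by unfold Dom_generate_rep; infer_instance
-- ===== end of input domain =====

-- B builds the list of missing keywords first and formats it with join/slicing, instead of
-- A's running string plus an rsplit at the last comma to insert ' et' (objective: simpler).


-- ===== PORT A =====
def pvKeywords : List String := ["le materiel", "le lieu", "les budgets", "les dates"]

-- one iteration of A's for-loop: state is (rep, i); keywords[i] via pyGet? (none = IndexError,
-- excluded by Pre_; .getD "" is never taken inside Pre_)
def pvStepA (p : List Char × Int) (data : List Int) : List Char × Int :=
  let rep := p.1
  let i := p.2
  let rep :=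
    if data = [] then
      if rep = [] then ("Veuillez préciser ".toList) ++ ((PySem.List.pyGet? pvKeywords i).getD "").toList
      else rep ++ (", ".toList) ++ ((PySem.List.pyGet? pvKeywords i).getD "").toList
    else rep
  (rep, i + 1)

-- hand port of rep.rsplit(',', 1): split at the LAST ',' (exact: prefers a split in the tail);
-- none when no comma occurs
def pvRsplitComma : List Char → Option (List Char × List Char)
  | [] => none
  | c :: cs =>
    match pvRsplitComma cs with
    | some (b, a) => some (c :: b, a)
    | none => if c = ',' then some ([], cs) else none

def generate_rep (datas : List (List Int)) : String :=
  let st := datas.foldl pvStepA ([], 0)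
  let rep := st.1
  let rep :=
    if rep.contains ',' then
      match pvRsplitComma rep with
      | some (b, a) => b ++ (" et".toList) ++ a
      | none => rep
    else rep
  String.ofList rep

-- ===== PORT B =====
-- the comprehension [keywords[i] for i, data in enumerate(datas) if not data], carrying the index
def pvMissFrom (i : Int) : List (List Int) → List (List Char)
  | [] => []
  | d :: ds =>
    (if d = [] then [((PySem.List.pyGet? pvKeywords i).getD "").toList] else []) ++ pvMissFrom (i + 1) ds

def generate_rep_alt (datas : List (List Int)) : String :=
  let missing := pvMissFrom 0 datas
  match missing with
  | [] => ""
  | [m] => String.ofList ("Veuillez préciser ".toList ++ m)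
  | _ => String.ofList ("Veuillez préciser ".toList
           ++ (missing.dropLast.intersperse (", ".toList)).flatten
           ++ " et ".toList ++ (missing.getLast?.getD []))

-- ===== PRECONDITION & SPEC =====
-- Pre_ excludes exactly the inputs where A raises IndexError: an empty entry at index ≥ 4
-- (keywords has only 4 elements).
def Pre_generate_rep (datas : List (List Int)) : Prop := ∀ l ∈ datas.drop 4, l ≠ []
instance (datas : List (List Int)) : Decidable (Pre_generate_rep datas) := by unfold Pre_generate_rep; infer_instance
def pvWitness_generate_rep : List (List Int) := [[], [1]]

def Spec_generate_rep (datas : List (List Int)) (out : String) : Prop := out = generate_rep_alt datas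
instance (datas : List (List Int)) (out : String) : Decidable (Spec_generate_rep datas out) := by unfold Spec_generate_rep; infer_instance

-- ===== CLAIM (what is proved, stated in full; the proofs are below) =====
def Claim_equal_generate_rep : Prop := ∀ (datas : List (List Int)), Dom_generate_rep datas → Pre_generate_rep datas → Spec_generate_rep datas (generate_rep datas)

-- ===== LEMMAS AND PROOFS =====

-- A's loop ignores nonempty entries: only i advances
theorem pv_foldA_nonempty (rest : List (List Int)) :
    (∀ l ∈ rest, l ≠ []) → ∀ (rep : List Char) (i : Int),
    (List.foldl pvStepA (rep, i) rest).1 = rep := by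
  induction rest with
  | nil => intro _ rep i; rfl
  | cons d ds ih =>
    intro h rep i
    have hd : d ≠ [] := h d (by simp)
    simp only [List.foldl_cons, pvStepA, if_neg hd]
    exact ih (fun l hl => h l (by simp [hl])) rep (i + 1)

-- B's comprehension skips nonempty entries
theorem pv_miss_nonempty (rest : List (List Int)) :
    (∀ l ∈ rest, l ≠ []) → ∀ (i : Int), pvMissFrom i rest = [] := by
  induction rest with
  | nil => intro _ _; rfl
  | cons d ds ih =>
    intro h i
    have hd : d ≠ [] := h d (by simp)
    simp only [pvMissFrom, if_neg hd, List.nil_append]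
    exact ih (fun l hl => h l (by simp [hl])) (i + 1)

-- ===== VERDICT (by name: the statement is the Claim_ definition above) =====
theorem generate_rep_spec : Claim_equal_generate_rep := by
  intro datas _ hPre
  unfold Spec_generate_rep
  match datas with
  | [] => decide
  | [d0] =>
    by_cases h0 : d0 = [] <;>
      simp [generate_rep, generate_rep_alt, pvMissFrom, pvStepA, h0] <;> decide
  | [d0, d1] =>
    by_cases h0 : d0 = [] <;> by_cases h1 : d1 = [] <;>
      simp [generate_rep, generate_rep_alt, pvMissFrom, pvStepA, h0, h1] <;> decide
  | [d0, d1, d2] =>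
    by_cases h0 : d0 = [] <;> by_cases h1 : d1 = [] <;> by_cases h2 : d2 = [] <;>
      simp [generate_rep, generate_rep_alt, pvMissFrom, pvStepA, h0, h1, h2] <;> decide
  | d0 :: d1 :: d2 :: d3 :: rest =>
    have hrest : ∀ l ∈ rest, l ≠ [] := by
      intro l hl; exact hPre l (by simpa using hl)
    by_cases h0 : d0 = [] <;> by_cases h1 : d1 = [] <;> by_cases h2 : d2 = [] <;> by_cases h3 : d3 = [] <;>
      simp [generate_rep, generate_rep_alt, pvMissFrom, pvStepA, h0, h1, h2, h3,
        pv_foldA_nonempty rest hrest, pv_miss_nonempty rest hrest] <;> decide
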